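-- pv_equiv track=rewrite | github.com/squarezw/ragent-lab | lab.py | modality_specific_chunking
-- ===== SOURCE A (Python) =====
-- def modality_specific_chunking(text):
--     """
--     处理多模态内容的分块（示例：代码+文本混合）
--     :param text: 输入文本
--     :return: 分块列表（带类型标记）
--     """
--     # 实际应用中需根据内容类型使用不同解析器
--     chunks = []
--     current_type = None
--     buffer = ""
--
--     # 简化逻辑：根据行首字符判断类型
--     for line in text.split('\n'):
--         if line.startswith('    ') or line.startswith('def ') or line.startswith('import'):
--             if current_type != 'code':
--                 if buffer: chunks.append({"type": current_type, "content": buffer})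
--                 current_type = 'code'
--                 buffer = line + '\n'
--             else:
--                 buffer += line + '\n'
--         else:
--             if current_type != 'text':
--                 if buffer: chunks.append({"type": current_type, "content": buffer})
--                 current_type = 'text'
--                 buffer = line + '\n'
--             else:
--                 buffer += line + '\n'
--
--     if buffer: chunks.append({"type": current_type, "content": buffer})
--     return chunks
-- ===== SOURCE B (Python) =====
-- def _kind(line):
--     return 'code' if line.startswith(('    ', 'def ', 'import')) else 'text'
--
-- def modality_specific_chunking(text):
--     lines = text.split('\n')
--     chunks = []
--     while lines:
--         t = _kind(lines[0])
--         i = 1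
--         while i < len(lines) and _kind(lines[i]) == t:
--             i += 1
--         chunks.append({"type": t, "content": ''.join(l + '\n' for l in lines[:i])})
--         lines = lines[i:]
--     return chunks
-- ===== Notes on version B (the rewrite author's own statement) =====
-- stated objective: alternative
-- what changed: Replaced the buffer/current_type/emit-on-change state machine by a classify-then-group pipeline: each line's type is computed by a predicate and consecutive same-type runs are grouped into chunks by scanning run boundaries.
import Mathlib
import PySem

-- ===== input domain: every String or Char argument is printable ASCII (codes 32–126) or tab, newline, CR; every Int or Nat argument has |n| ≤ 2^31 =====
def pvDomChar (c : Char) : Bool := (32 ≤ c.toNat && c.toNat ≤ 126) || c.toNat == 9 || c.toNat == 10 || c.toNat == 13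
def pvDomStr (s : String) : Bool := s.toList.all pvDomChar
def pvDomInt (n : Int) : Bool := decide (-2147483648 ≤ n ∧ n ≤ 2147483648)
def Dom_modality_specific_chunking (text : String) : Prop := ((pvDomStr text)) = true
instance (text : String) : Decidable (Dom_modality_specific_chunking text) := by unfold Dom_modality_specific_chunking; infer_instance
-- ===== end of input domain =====

-- B replaces A's buffer/current_type state machine by classify-then-group: label each line
-- 'code'/'text' with a predicate, then collect maximal runs of equally-labelled lines (objective: alternative).

-- ===== PORT A =====
-- A's per-line state machine: state = (chunks so far, current_type, buffer).
-- Python's current_type starts as None and is only ever compared to / set to 'code'/'text';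
-- None is modelled as "" (distinct from both), and a chunk is only emitted when the buffer is
-- nonempty, which never happens while current_type is still None.
def pvLoopA : List (List Char) → List (List (String × String)) → String → List Char → List (List (String × String))
  | [], chunks, cur, buf =>
      if buf ≠ [] then chunks ++ [[("type", cur), ("content", String.ofList buf)]] else chunks
  | l :: rest, chunks, cur, buf =>
      if PySem.Chars.startswith l "    ".toList || PySem.Chars.startswith l "def ".toList
          || PySem.Chars.startswith l "import".toList then
        if cur ≠ "code" then
          pvLoopA rest
            (if buf ≠ [] then chunks ++ [[("type", cur), ("content", String.ofList buf)]] else chunks)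
            "code" (l ++ ['\n'])
        else
          pvLoopA rest chunks cur (buf ++ (l ++ ['\n']))
      else
        if cur ≠ "text" then
          pvLoopA rest
            (if buf ≠ [] then chunks ++ [[("type", cur), ("content", String.ofList buf)]] else chunks)
            "text" (l ++ ['\n'])
        else
          pvLoopA rest chunks cur (buf ++ (l ++ ['\n']))

def modality_specific_chunking (text : String) : List (List (String × String)) :=
  pvLoopA (PySem.Chars.splitOn text.toList ['\n']) [] "" []

-- ===== PORT B =====
-- _kind(line)
def pvKindB (l : List Char) : String :=
  if PySem.Chars.startswith l "    ".toList || PySem.Chars.startswith l "def ".toList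
      || PySem.Chars.startswith l "import".toList then "code" else "text"

-- ''.join(l + '\n' for l in run)
def pvJoinNL : List (List Char) → List Char
  | [] => []
  | l :: ls => l ++ '\n' :: pvJoinNL ls

-- the while loop over the remaining lines: take the maximal run of the head's kind, emit, recurse
def pvChunksOf : List (List Char) → List (List (String × String))
  | [] => []
  | l :: rest =>
      [("type", pvKindB l),
       ("content", String.ofList (l ++ '\n' :: pvJoinNL (rest.takeWhile (fun x => pvKindB x == pvKindB l))))]
        :: pvChunksOf (rest.dropWhile (fun x => pvKindB x == pvKindB l))
termination_by ls => ls.length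
decreasing_by
  simpa using Nat.lt_succ_of_le (List.length_dropWhile_le _ _)

def modality_specific_chunking_alt (text : String) : List (List (String × String)) :=
  pvChunksOf (PySem.Chars.splitOn text.toList ['\n'])

-- ===== PRECONDITION & SPEC =====
def Spec_modality_specific_chunking (text : String) (out : List (List (String × String))) : Prop := out = modality_specific_chunking_alt text
instance (text : String) (out : List (List (String × String))) : Decidable (Spec_modality_specific_chunking text out) := by unfold Spec_modality_specific_chunking; infer_instance

-- ===== CLAIM (what is proved, stated in full; the proofs are below) =====
def Claim_equal_modality_specific_chunking : Prop := ∀ (text : String), Dom_modality_specific_chunking text → Spec_modality_specific_chunking text (modality_specific_chunking text)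

-- ===== LEMMAS AND PROOFS =====

-- abstract chunks as (type, content-chars) pairs
def pvRender (g : String × List Char) : List (String × String) :=
  [("type", g.1), ("content", String.ofList g.2)]

def pvGroups : List (List Char) → List (String × List Char)
  | [] => []
  | l :: rest =>
      (pvKindB l, l ++ '\n' :: pvJoinNL (rest.takeWhile (fun x => pvKindB x == pvKindB l)))
        :: pvGroups (rest.dropWhile (fun x => pvKindB x == pvKindB l))
termination_by ls => ls.length
decreasing_by
  simpa using Nat.lt_succ_of_le (List.length_dropWhile_le _ _)

-- prepend a pending run of kind t with content buf onto a group list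
def pvMergeG (t : String) (buf : List Char) : List (String × List Char) → List (String × List Char)
  | [] => [(t, buf)]
  | (t', c) :: gs => if t' = t then (t, buf ++ c) :: gs else (t, buf) :: (t', c) :: gs

lemma pvChunksOf_eq_map (ls : List (List Char)) :
    pvChunksOf ls = (pvGroups ls).map pvRender := by
  induction ls using pvChunksOf.induct with
  | case1 => simp [pvChunksOf, pvGroups]
  | case2 l rest ih =>
      rw [pvChunksOf, pvGroups]
      simp [pvRender, ih]

lemma pvGroups_cons (l : List Char) (rest : List (List Char)) :
    pvGroups (l :: rest) = pvMergeG (pvKindB l) (l ++ ['\n']) (pvGroups rest) := by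
  cases rest with
  | nil => simp only [pvGroups, pvMergeG, pvJoinNL, List.takeWhile_nil, List.dropWhile_nil]
  | cons r rest' =>
      by_cases h : pvKindB r = pvKindB l
      · simp only [pvGroups, pvMergeG, List.takeWhile_cons, List.dropWhile_cons, h]
        simp [pvJoinNL]
      · have hb : (pvKindB r == pvKindB l) = false := by simpa using h
        rw [pvGroups]
        simp only [List.takeWhile_cons, List.dropWhile_cons, hb, Bool.false_eq_true, if_false, pvJoinNL]
        conv_lhs => rw [pvGroups]
        conv_rhs => rw [pvGroups]
        simp only [pvMergeG]
        rw [if_neg h]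


lemma pvMergeG_mergeG (t : String) (buf c : List Char) (gs : List (String × List Char)) :
    pvMergeG t buf (pvMergeG t c gs) = pvMergeG t (buf ++ c) gs := by
  cases gs with
  | nil => simp [pvMergeG]
  | cons g gs' =>
      obtain ⟨t', c'⟩ := g
      by_cases h : t' = t <;> simp [pvMergeG, h]

lemma pvMergeG_ne (t k : String) (buf c : List Char) (gs : List (String × List Char))
    (hne : k ≠ t) :
    pvMergeG t buf (pvMergeG k c gs) = (t, buf) :: pvMergeG k c gs := by
  cases gs with
  | nil => simp [pvMergeG, hne]
  | cons g gs' =>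
      obtain ⟨t', c'⟩ := g
      by_cases h : t' = k <;> simp [pvMergeG, h, hne]

lemma pvLoopA_eq (ls : List (List Char)) :
    ∀ (chunks : List (List (String × String))) (t : String) (buf : List Char),
      buf ≠ [] → (t = "code" ∨ t = "text") →
      pvLoopA ls chunks t buf = chunks ++ (pvMergeG t buf (pvGroups ls)).map pvRender := by
  induction ls with
  | nil =>
      intro chunks t buf hbuf _
      simp [pvLoopA, pvGroups, pvMergeG, hbuf, pvRender]
  | cons l rest ih =>
      intro chunks t buf hbuf ht
      rw [pvGroups_cons, pvLoopA]
      by_cases hc : (PySem.Chars.startswith l "    ".toList || PySem.Chars.startswith l "def ".toList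
          || PySem.Chars.startswith l "import".toList) = true
      · have hk : pvKindB l = "code" := by unfold pvKindB; rw [if_pos hc]
        rw [hk, if_pos hc]
        by_cases hcur : t = "code"
        · subst hcur
          rw [if_neg (not_not_intro rfl)]
          rw [ih chunks "code" (buf ++ (l ++ ['\n'])) (by simp [hbuf]) (Or.inl rfl)]
          rw [pvMergeG_mergeG]
        · rw [if_pos hcur, if_pos hbuf]
          rw [ih _ "code" (l ++ ['\n']) (by simp) (Or.inl rfl)]
          rw [pvMergeG_ne t "code" buf (l ++ ['\n']) _ (fun h => hcur h.symm)]
          simp [pvRender]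
      · have hk : pvKindB l = "text" := by unfold pvKindB; rw [if_neg hc]
        rw [hk, if_neg hc]
        by_cases hcur : t = "text"
        · subst hcur
          rw [if_neg (not_not_intro rfl)]
          rw [ih chunks "text" (buf ++ (l ++ ['\n'])) (by simp [hbuf]) (Or.inr rfl)]
          rw [pvMergeG_mergeG]
        · rw [if_pos hcur, if_pos hbuf]
          rw [ih _ "text" (l ++ ['\n']) (by simp) (Or.inr rfl)]
          rw [pvMergeG_ne t "text" buf (l ++ ['\n']) _ (fun h => hcur h.symm)]
          simp [pvRender]

-- ===== VERDICT (by name: the statement is the Claim_ definition above) =====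
theorem modality_specific_chunking_spec : Claim_equal_modality_specific_chunking := by
  intro text _
  show _ = _
  unfold modality_specific_chunking modality_specific_chunking_alt
  rw [pvChunksOf_eq_map]
  cases hls : PySem.Chars.splitOn text.toList ['\n'] with
  | nil => simp [pvLoopA, pvGroups]
  | cons l rest =>
      rw [pvGroups_cons, pvLoopA]
      by_cases hc : (PySem.Chars.startswith l "    ".toList || PySem.Chars.startswith l "def ".toList
          || PySem.Chars.startswith l "import".toList) = true
      · have hk : pvKindB l = "code" := by unfold pvKindB; rw [if_pos hc]
        rw [hk, if_pos hc, if_pos (by decide), if_neg (not_not_intro rfl)]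
        exact pvLoopA_eq rest [] "code" (l ++ ['\n']) (by simp) (Or.inl rfl)
      · have hk : pvKindB l = "text" := by unfold pvKindB; rw [if_neg hc]
        rw [hk, if_neg hc, if_pos (by decide), if_neg (not_not_intro rfl)]
        exact pvLoopA_eq rest [] "text" (l ++ ['\n']) (by simp) (Or.inr rfl)
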